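-- pv_equiv track=rewrite | github.com/inergoul/boostcamp_peer_session | coding_test/42586-기능개발/solution_MJH.py | solution
-- ===== SOURCE A (Python) =====
-- def solution(progresses, speeds):
--     mylist = [(100-p)//s if (100-p)%s==0 else (100-p)//s+1 for p,s in zip(progresses,speeds)]
--     answer = []
--     while len(mylist)>0:
--         get = mylist.pop(0)
--         a = 1
--         if len(mylist)!=0:
--             while get>=mylist[0]:
--                 a+=1
--                 mylist.pop(0)
--                 if len(mylist)==0:
--                     break
--         answer.append(a)
--     return answer
-- ===== SOURCE B (Python) =====
-- def solution(progresses, speeds):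
--     answer = []
--     leader = None
--     count = 0
--     for p, s in zip(progresses, speeds):
--         q, r = divmod(100 - p, s)
--         d = q if r == 0 else q + 1
--         if leader is None:
--             leader, count = d, 1
--         elif d > leader:
--             answer.append(count)
--             leader, count = d, 1
--         else:
--             count += 1
--     if leader is not None:
--         answer.append(count)
--     return answer
-- ===== Notes on version B (the rewrite author's own statement) =====
-- stated objective: faster
-- what changed: Replaces the destructive pop(0) double loop with a single left-to-right pass that keeps the current group's leading day count, so no list mutation or shifting occurs.
import Mathlib
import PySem

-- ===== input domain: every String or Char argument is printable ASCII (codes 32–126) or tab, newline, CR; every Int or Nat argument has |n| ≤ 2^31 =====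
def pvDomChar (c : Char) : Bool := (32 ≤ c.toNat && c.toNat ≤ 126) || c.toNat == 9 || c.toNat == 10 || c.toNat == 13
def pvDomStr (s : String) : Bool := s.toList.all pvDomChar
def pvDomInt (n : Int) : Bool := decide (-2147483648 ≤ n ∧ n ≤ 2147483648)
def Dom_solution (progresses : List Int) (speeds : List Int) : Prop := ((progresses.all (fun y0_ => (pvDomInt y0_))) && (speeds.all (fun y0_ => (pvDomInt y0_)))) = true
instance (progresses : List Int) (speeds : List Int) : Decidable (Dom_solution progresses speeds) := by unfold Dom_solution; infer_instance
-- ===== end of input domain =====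

-- ===== PORT A =====
-- B replaces the pop(0) double loop with one left-to-right pass keeping the group leader's day count (objective: faster).
-- days for one feature: (100-p)//s if (100-p)%s==0 else (100-p)//s+1
def pvDays (p : Int) (s : Int) : Int :=
  if PySem.Int.mod (100 - p) s = 0 then PySem.Int.floordiv (100 - p) s
  else PySem.Int.floordiv (100 - p) s + 1

-- inner while loop of A: consumes while get >= head, counting into a
def pvInner (get : Int) (rest : List Int) (a : Int) : Int × List Int :=
  match rest with
  | [] => (a, [])
  | x :: xs => if get ≥ x then pvInner get xs (a + 1) else (a, x :: xs)

theorem pvInner_len_le (get : Int) (rest : List Int) (a : Int) :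
    (pvInner get rest a).2.length ≤ rest.length := by
  induction rest generalizing a with
  | nil => simp [pvInner]
  | cons x xs ih =>
    simp only [pvInner]
    split
    · exact le_trans (ih (a + 1)) (Nat.le_succ _)
    · exact le_refl _

-- outer while loop of A
def pvLoopA (mylist : List Int) : List Int :=
  match mylist with
  | [] => []
  | get :: rest =>
    let r := pvInner get rest 1
    r.1 :: pvLoopA r.2
  termination_by mylist.length
  decreasing_by
    simpa using Nat.lt_succ_of_le (pvInner_len_le get rest 1)

def solution (progresses : List Int) (speeds : List Int) : List Int :=
  pvLoopA ((progresses.zip speeds).map (fun ps => pvDays ps.1 ps.2))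

-- ===== PORT B =====
-- state: (answer so far, current group's leader day, current group size)
def pvStep (st : List Int × Option Int × Int) (ps : Int × Int) : List Int × Option Int × Int :=
  let d := pvDays ps.1 ps.2
  match st with
  | (answer, none, _) => (answer, some d, 1)
  | (answer, some l, count) =>
    if d > l then (answer ++ [count], some d, 1) else (answer, some l, count + 1)

def solution_alt (progresses : List Int) (speeds : List Int) : List Int :=
  match (progresses.zip speeds).foldl pvStep ([], none, 0) with
  | (answer, none, _) => answer
  | (answer, some _, count) => answer ++ [count]

-- ===== PRECONDITION & SPEC =====
-- Pre_ excludes exactly the inputs where A raises ZeroDivisionError: a zero speed among the zipped pairs.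
def Pre_solution (progresses : List Int) (speeds : List Int) : Prop :=
  ∀ q ∈ progresses.zip speeds, q.2 ≠ 0
instance (progresses : List Int) (speeds : List Int) : Decidable (Pre_solution progresses speeds) := by
  unfold Pre_solution; infer_instance
def pvWitness_solution : List Int × List Int := ([93, 30, 55], [1, 30, 5])
def Spec_solution (progresses : List Int) (speeds : List Int) (out : List Int) : Prop := out = solution_alt progresses speeds
instance (progresses : List Int) (speeds : List Int) (out : List Int) : Decidable (Spec_solution progresses speeds out) := by unfold Spec_solution; infer_instance

-- ===== CLAIM (what is proved, stated in full; the proofs are below) =====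
def Claim_equal_solution : Prop := ∀ (progresses : List Int) (speeds : List Int), Dom_solution progresses speeds → Pre_solution progresses speeds → Spec_solution progresses speeds (solution progresses speeds)

-- ===== LEMMAS AND PROOFS =====

-- proof-side view of B's step acting on the precomputed day value
def pvStep' (st : List Int × Option Int × Int) (d : Int) : List Int × Option Int × Int :=
  match st with
  | (answer, none, _) => (answer, some d, 1)
  | (answer, some l, count) =>
    if d > l then (answer ++ [count], some d, 1) else (answer, some l, count + 1)

def pvFinish (st : List Int × Option Int × Int) : List Int :=
  match st with
  | (answer, none, _) => answer
  | (answer, some _, count) => answer ++ [count]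

-- B's fold launched inside a group (leader l, count c) finishes the group exactly like A's inner loop
theorem pvFold_inner (ds : List Int) (acc : List Int) (l : Int) (c : Int) :
    pvFinish (ds.foldl pvStep' (acc, some l, c)) =
    acc ++ ((pvInner l ds c).1 :: pvLoopA (pvInner l ds c).2) := by
  induction ds generalizing acc l c with
  | nil => simp [pvInner, pvLoopA, pvFinish]
  | cons x xs ih =>
    by_cases h : l ≥ x
    · have hnot : ¬ x > l := not_lt.mpr h
      simp only [List.foldl_cons, pvStep', if_neg hnot, pvInner, if_pos h]
      exact ih acc l (c + 1)
    · have hx : x > l := lt_of_not_ge h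
      simp only [List.foldl_cons, pvStep', if_pos hx, pvInner, if_neg h]
      rw [ih (acc ++ [c]) x 1, List.append_assoc]
      simp [pvLoopA]

theorem pvLoop_eq (ds : List Int) :
    pvFinish (ds.foldl pvStep' ([], none, 0)) = pvLoopA ds := by
  cases ds with
  | nil => simp [pvFinish, pvLoopA]
  | cons x xs =>
    simp only [List.foldl_cons, pvStep']
    rw [pvFold_inner xs [] x 1]
    simp [pvLoopA]

-- ===== VERDICT (by name: the statement is the Claim_ definition above) =====
theorem solution_spec : Claim_equal_solution := by
  intro progresses speeds _ _
  unfold Spec_solution solution solution_alt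
  have hfold : (progresses.zip speeds).foldl pvStep ([], none, 0) =
      ((progresses.zip speeds).map (fun ps => pvDays ps.1 ps.2)).foldl pvStep' ([], none, 0) := by
    rw [List.foldl_map]; rfl
  rw [hfold, show (∀ st, (match st with
      | (answer, none, _) => answer
      | (answer, some _, count) => answer ++ [count]) = pvFinish st) from fun _ => rfl]
  exact (pvLoop_eq _).symm
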